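-- pv_equiv track=rewrite | github.com/pragundamani/CS1134 | labs hw/hw4/pd2752_hw4_q6.py | appearances
-- ===== SOURCE A (Python) =====
-- def appearances(s,low,high):
--     if low>high:
--         return {}
--     counts = appearances(s,low,high-1)
--     char = s[high]
--     if char in counts:
--         counts[char] = counts[char]+1
--     else:
--         counts[char] = 1
--     return counts
-- ===== SOURCE B (Python) =====
-- def appearances(s, low, high):
--     counts = {}
--     for i in range(low, high + 1):
--         ch = s[i]
--         counts[ch] = counts.get(ch, 0) + 1
--     return counts
-- ===== Notes on version B (the rewrite author's own statement) =====
-- stated objective: simpler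
-- what changed: Replaces the O(n)-deep recursion (one frame per character) with a single forward loop over range(low, high+1) accumulating counts in a dict via get.
import Mathlib
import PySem

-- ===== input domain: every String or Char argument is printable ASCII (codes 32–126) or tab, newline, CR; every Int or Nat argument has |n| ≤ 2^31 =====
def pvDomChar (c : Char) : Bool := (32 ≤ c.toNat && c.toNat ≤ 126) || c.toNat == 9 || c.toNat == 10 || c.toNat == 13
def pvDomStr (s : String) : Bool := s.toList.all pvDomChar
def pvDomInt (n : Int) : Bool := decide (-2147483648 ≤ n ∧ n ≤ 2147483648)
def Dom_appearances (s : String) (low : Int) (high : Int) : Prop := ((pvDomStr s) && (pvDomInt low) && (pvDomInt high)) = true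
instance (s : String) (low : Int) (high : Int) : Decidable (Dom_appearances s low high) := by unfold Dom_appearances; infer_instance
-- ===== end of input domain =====

-- B replaces A's one-frame-per-character recursion with a single forward counting loop;
-- equal return values on all inputs where A returns (Pre_ excludes exactly the IndexError inputs, where B raises too).

-- ===== PORT A =====
-- A builds the dict recursively: recurse on s[low..high-1], then count s[high].
def appearancesARec (s : List Char) (low : Int) (high : Int) : PySem.Dict String Int :=
  if low > high then PySem.Dict.empty
  else
    let counts := appearancesARec s low (high - 1)
    match PySem.List.pyGet? s high with
    | some c =>
        let ch := String.ofList [c]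
        if counts.contains ch then counts.insert ch (counts.getD ch 0 + 1)
        else counts.insert ch 1
    | none => counts  -- Python raises IndexError here; excluded by Pre_
  termination_by (high - low + 1).toNat
  decreasing_by omega

def appearances (s : String) (low : Int) (high : Int) : List (String × Int) :=
  (appearancesARec s.toList low high).items

-- ===== PORT B =====
-- B: counts = {}; for i in range(low, high+1): counts[s[i]] = counts.get(s[i], 0) + 1
def appearances_alt (s : String) (low : Int) (high : Int) : List (String × Int) :=
  ((PySem.List.pyRange low (high + 1) 1).foldl
    (fun d i =>
      match PySem.List.pyGet? s.toList i with
      | some c => d.insert (String.ofList [c]) (d.getD (String.ofList [c]) 0 + 1)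
      | none => d)  -- Python raises IndexError here; excluded by Pre_
    PySem.Dict.empty).items

-- ===== PRECONDITION & SPEC =====
-- Pre_ excludes exactly the inputs where Python A raises IndexError: a nonempty index
-- range low..high whose endpoints are not valid (possibly negative) indices into s.
def Pre_appearances (s : String) (low : Int) (high : Int) : Prop :=
  low > high ∨ (-(s.toList.length : Int) ≤ low ∧ high < s.toList.length)
instance (s : String) (low : Int) (high : Int) : Decidable (Pre_appearances s low high) := by
  unfold Pre_appearances; infer_instance

def pvWitness_appearances : String × Int × Int := ("abcab", 0, 4)

def Spec_appearances (s : String) (low : Int) (high : Int) (out : List (String × Int)) : Prop := out = appearances_alt s low high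
instance (s : String) (low : Int) (high : Int) (out : List (String × Int)) : Decidable (Spec_appearances s low high out) := by unfold Spec_appearances; infer_instance

-- ===== CLAIM (what is proved, stated in full; the proofs are below) =====
def Claim_equal_appearances : Prop := ∀ (s : String) (low : Int) (high : Int), Dom_appearances s low high → Pre_appearances s low high → Spec_appearances s low high (appearances s low high)

-- ===== LEMMAS AND PROOFS =====

-- A's two-branch update equals B's unconditional `d[ch] = d.get(ch, 0) + 1`.
lemma step_eq (d : PySem.Dict String Int) (ch : String) :
    (if d.contains ch then d.insert ch (d.getD ch 0 + 1) else d.insert ch 1)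
      = d.insert ch (d.getD ch 0 + 1) := by
  cases h : d.contains ch with
  | true => rfl
  | false => rw [PySem.Dict.getD_of_not_contains d 0 h]; simp

lemma rec_eq_fold (s : List Char) (low : Int) (n : Nat) :
    ∀ high : Int, (high - low + 1).toNat = n →
    (low > high ∨ (-(s.length : Int) ≤ low ∧ high < s.length)) →
    appearancesARec s low high
      = (PySem.List.pyRange low (high + 1) 1).foldl
          (fun d i =>
            match PySem.List.pyGet? s i with
            | some c => d.insert (String.ofList [c]) (d.getD (String.ofList [c]) 0 + 1)
            | none => d)
          (PySem.Dict.empty : PySem.Dict String Int) := by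
  induction n with
  | zero =>
    intro high hn _
    have hlt : low > high := by omega
    rw [appearancesARec, PySem.List.pyRange_one_eq_nil (by omega)]
    simp [hlt]
  | succ n ih =>
    intro high hn hpre
    have hle : low ≤ high := by omega
    have hrng : -(s.length : Int) ≤ low ∧ high < s.length := by
      rcases hpre with h | h
      · omega
      · exact h
    have hget : PySem.Raise.InRange s.length high := by
      constructor <;> omega
    obtain ⟨c, hc⟩ : ∃ c, PySem.List.pyGet? s high = some c := by
      cases h : PySem.List.pyGet? s high with
      | none => exact absurd ((PySem.List.pyGet?_eq_none_iff s high).mp h) (by simp [hget])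
      | some c => exact ⟨c, rfl⟩
    rw [appearancesARec]
    simp only [show ¬ low > high by omega, if_false, hc]
    rw [PySem.List.pyRange_one_succ_right (by omega),
        List.foldl_append]
    rw [ih (high - 1) (by omega) (Or.inr ⟨hrng.1, by omega⟩), show high - 1 + 1 = high from by omega]
    simp only [List.foldl_cons, List.foldl_nil, hc]
    exact step_eq _ _

-- ===== VERDICT (by name: the statement is the Claim_ definition above) =====
theorem appearances_spec : Claim_equal_appearances := by
  intro s low high _ hpre
  unfold Spec_appearances appearances appearances_alt
  exact congrArg PySem.Dict.items
    (rec_eq_fold s.toList low ((high - low + 1).toNat) high rfl hpre)
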